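-- pv_equiv track=rewrite | github.com/kjuhwa/skills-hub | bootstrap/tools/_lint_frontmatter.py | parse_flat_keys
-- ===== SOURCE A (Python) =====
-- def parse_flat_keys(raw: str) -> dict[str, str]:
--     """Collect only the top-level (column 0) `key:` entries — values stay raw."""
--     out: dict[str, str] = {}
--     current_key: str | None = None
--     buffer: list[str] = []
--     for line in raw.splitlines():
--         if not line:
--             continue
--         if line[0].isspace() or line.startswith("#"):
--             if current_key is not None:
--                 buffer.append(line)
--             continue
--         if ":" not in line:
--             continue
--         if current_key is not None:
--             out[current_key] = (out[current_key] + "\n" + "\n".join(buffer)).rstrip()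
--             buffer = []
--         key, _, value = line.partition(":")
--         current_key = key.strip()
--         out[current_key] = value.strip()
--     if current_key is not None and buffer:
--         out[current_key] = (out[current_key] + "\n" + "\n".join(buffer)).rstrip()
--     return out
-- ===== SOURCE B (Python) =====
-- def parse_flat_keys(raw: str) -> dict[str, str]:
--     """Collect only the top-level (column 0) `key:` entries — values stay raw."""
--     # pass 1: group the lines into ordered segments (key, value, continuation lines)
--     segments: list[tuple[str, str, list[str]]] = []
--     for line in raw.splitlines():
--         if not line:
--             continue
--         if line[0].isspace() or line.startswith("#"):
--             if segments:
--                 segments[-1][2].append(line)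
--         elif ":" in line:
--             key, _, value = line.partition(":")
--             segments.append((key.strip(), value.strip(), []))
--     # pass 2: join each segment; later duplicate keys overwrite earlier ones
--     out: dict[str, str] = {}
--     for key, value, conts in segments:
--         out[key] = "\n".join([value] + conts).rstrip()
--     return out
-- ===== Notes on version B (the rewrite author's own statement) =====
-- stated objective: simpler
-- what changed: A's single stateful loop that mutates the dict as it goes (with an in-loop flush and a trailing flush) is replaced by two passes: group the lines into an ordered list of (key, value, continuations) segments, then join each segment once into the dict, later duplicates overwriting.
import Mathlib
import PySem

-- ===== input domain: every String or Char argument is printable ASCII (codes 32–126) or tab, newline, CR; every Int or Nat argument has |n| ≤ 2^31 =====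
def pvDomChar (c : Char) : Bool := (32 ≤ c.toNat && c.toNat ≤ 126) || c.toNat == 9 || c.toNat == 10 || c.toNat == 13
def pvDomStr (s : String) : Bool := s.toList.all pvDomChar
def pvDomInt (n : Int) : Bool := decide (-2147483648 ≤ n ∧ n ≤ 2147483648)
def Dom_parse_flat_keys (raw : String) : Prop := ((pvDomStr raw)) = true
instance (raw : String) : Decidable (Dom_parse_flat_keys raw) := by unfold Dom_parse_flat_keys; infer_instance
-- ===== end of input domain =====

-- B re-implements A's single stateful loop (dict mutated on the fly with flush steps) as two passes:
-- group the lines into ordered (key, value, continuations) segments, then join each segment into the dict.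
-- Objective: simpler decomposition; same asymptotic cost. Return-value equivalence only (neither mutates its argument).

-- ===== PORT A =====
-- line.partition(":") for the single-char separator ':' is exact as
-- (takeWhile (· ≠ ':'), dropWhile (· ≠ ':') |>.drop 1)  (middle component unused by A).
-- A's flush: out[current_key] = (out[current_key] + "\n" + "\n".join(buffer)).rstrip()
def pvFlushA (out : PySem.Dict (List Char) (List Char)) (k : List Char) (buf : List (List Char)) :
    PySem.Dict (List Char) (List Char) :=
  out.insert k (PySem.Chars.rstrip (out.getD k [] ++ '\n' :: PySem.Chars.join ['\n'] buf))

-- one iteration of A's for-loop over (out, current_key, buffer)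
def pvStepA (st : PySem.Dict (List Char) (List Char) × Option (List Char) × List (List Char))
    (line : List Char) :
    PySem.Dict (List Char) (List Char) × Option (List Char) × List (List Char) :=
  match st with
  | (out, ck, buf) =>
    match line with
    | [] => (out, ck, buf)                         -- if not line: continue
    | c :: _ =>
      if PySem.Chars.isspace c || PySem.Chars.startswith line ['#'] then
        match ck with
        | some _ => (out, ck, buf ++ [line])
        | none => (out, ck, buf)
      else if PySem.Chars.isIn [':'] line then     -- 'if ":" not in line: continue' inverted
        let out1 := match ck with
          | some k => pvFlushA out k buf
          | none => out
        let key := PySem.Chars.strip (line.takeWhile (fun a => a ≠ ':'))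
        let value := PySem.Chars.strip ((line.dropWhile (fun a => a ≠ ':')).drop 1)
        (out1.insert key value, some key, [])
      else (out, ck, buf)

-- A's trailing 'if current_key is not None and buffer:' flush
def pvFinishA (st : PySem.Dict (List Char) (List Char) × Option (List Char) × List (List Char)) :
    PySem.Dict (List Char) (List Char) :=
  match st with
  | (out, some k, buf) => if buf.isEmpty then out else pvFlushA out k buf
  | (out, none, _) => out

def parse_flat_keys (raw : String) : List (String × String) :=
  let fin := pvFinishA ((PySem.Chars.splitlines raw.toList).foldl pvStepA (PySem.Dict.empty, none, []))
  fin.items.map (fun p => (String.ofList p.1, String.ofList p.2))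

-- ===== PORT B =====
-- segments[-1][2].append(line): rebuild the list with the last segment's continuation buffer extended
def pvAppendLast (segs : List (List Char × List Char × List (List Char))) (line : List Char) :
    List (List Char × List Char × List (List Char)) :=
  match segs with
  | [] => []
  | [s] => [(s.1, s.2.1, s.2.2 ++ [line])]
  | s :: rest => s :: pvAppendLast rest line

-- pass 1, one iteration: classify the line and extend the ordered segment list
def pvStepB (segs : List (List Char × List Char × List (List Char))) (line : List Char) :
    List (List Char × List Char × List (List Char)) :=
  match line with
  | [] => segs
  | c :: _ =>
    if PySem.Chars.isspace c || PySem.Chars.startswith line ['#'] then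
      if segs.isEmpty then segs else pvAppendLast segs line
    else if PySem.Chars.isIn [':'] line then
      segs ++ [(PySem.Chars.strip (line.takeWhile (fun a => a ≠ ':')),
                PySem.Chars.strip ((line.dropWhile (fun a => a ≠ ':')).drop 1), [])]
    else segs

-- pass 2: "\n".join([value] + conts).rstrip()
def pvJoinSeg (s : List Char × List Char × List (List Char)) : List Char :=
  PySem.Chars.rstrip (PySem.Chars.join ['\n'] (s.2.1 :: s.2.2))

def parse_flat_keys_alt (raw : String) : List (String × String) :=
  let segs := (PySem.Chars.splitlines raw.toList).foldl pvStepB []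
  let out := segs.foldl (fun d s => d.insert s.1 (pvJoinSeg s)) PySem.Dict.empty
  out.items.map (fun p => (String.ofList p.1, String.ofList p.2))

-- ===== PRECONDITION & SPEC =====
def Spec_parse_flat_keys (raw : String) (out : List (String × String)) : Prop := out = parse_flat_keys_alt raw
instance (raw : String) (out : List (String × String)) : Decidable (Spec_parse_flat_keys raw out) := by unfold Spec_parse_flat_keys; infer_instance

-- ===== CLAIM (what is proved, stated in full; the proofs are below) =====
def Claim_equal_parse_flat_keys : Prop := ∀ (raw : String), Dom_parse_flat_keys raw → Spec_parse_flat_keys raw (parse_flat_keys raw)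

-- ===== LEMMAS AND PROOFS =====

theorem pv_rstrip_rstrip (s : List Char) :
    PySem.Chars.rstrip (PySem.Chars.rstrip s) = PySem.Chars.rstrip s := by
  unfold PySem.Chars.rstrip
  rw [List.reverse_reverse, List.dropWhile_idempotent]

theorem pv_rstrip_strip (s : List Char) :
    PySem.Chars.rstrip (PySem.Chars.strip s) = PySem.Chars.strip s := by
  unfold PySem.Chars.strip; exact pv_rstrip_rstrip _

theorem pv_flush_join (v : List Char) (buf : List (List Char)) :
    PySem.Chars.rstrip (v ++ '\n' :: PySem.Chars.join ['\n'] buf)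
      = PySem.Chars.rstrip (PySem.Chars.join ['\n'] (v :: buf)) := by
  cases buf with
  | nil =>
    have h1 : PySem.Chars.join ['\n'] ([] : List (List Char)) = [] := rfl
    have h2 : PySem.Chars.join ['\n'] [v] = v := PySem.Chars.join_singleton _ _
    rw [h1, h2]
    unfold PySem.Chars.rstrip
    have hs : PySem.Chars.isspace '\n' = true := by decide
    simp [hs]
  | cons q rest =>
    rw [PySem.Chars.join_cons_cons]
    simp

-- A's flush after out[k] := v (and no other write to k since) is exactly B's segment insert
theorem pv_flushA_insert (d : PySem.Dict (List Char) (List Char)) (k v : List Char)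
    (buf : List (List Char)) :
    pvFlushA (d.insert k v) k buf = d.insert k (pvJoinSeg (k, v, buf)) := by
  unfold pvFlushA pvJoinSeg
  rw [PySem.Dict.getD_insert_self, PySem.Dict.insert_insert_self, pv_flush_join]

theorem pv_appendLast_ne_nil (segs : List (List Char × List Char × List (List Char)))
    (line : List Char) (h : segs ≠ []) : pvAppendLast segs line ≠ [] := by
  cases segs with
  | nil => exact absurd rfl h
  | cons s rest => cases rest <;> simp [pvAppendLast]

theorem pv_appendLast_append (pre l : List (List Char × List Char × List (List Char)))
    (line : List Char) (h : l ≠ []) :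
    pvAppendLast (pre ++ l) line = pre ++ pvAppendLast l line := by
  induction pre with
  | nil => simp
  | cons s pre' ih =>
    have h' : pre' ++ l ≠ [] := by simp [h]
    cases hpl : pre' ++ l with
    | nil => exact absurd hpl h'
    | cons a t =>
      show pvAppendLast (s :: (pre' ++ l)) line = s :: (pre' ++ pvAppendLast l line)
      rw [hpl]
      show s :: pvAppendLast (a :: t) line = s :: (pre' ++ pvAppendLast l line)
      rw [← hpl, ih]

theorem pv_stepB_ne_nil (segs : List (List Char × List Char × List (List Char)))
    (line : List Char) (h : segs ≠ []) : pvStepB segs line ≠ [] := by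
  cases line with
  | nil => exact h
  | cons c t =>
    simp only [pvStepB]
    by_cases hc : (PySem.Chars.isspace c || PySem.Chars.startswith (c :: t) ['#']) = true
    · rw [if_pos hc]
      by_cases he : segs.isEmpty = true
      · rw [if_pos he]; exact h
      · rw [if_neg he]; exact pv_appendLast_ne_nil segs _ h
    · rw [if_neg hc]
      by_cases hk : PySem.Chars.isIn [':'] (c :: t) = true
      · rw [if_pos hk]; simp
      · rw [if_neg hk]; exact h

theorem pv_stepB_append (pre l : List (List Char × List Char × List (List Char)))
    (line : List Char) (h : l ≠ []) :
    pvStepB (pre ++ l) line = pre ++ pvStepB l line := by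
  cases line with
  | nil => rfl
  | cons c t =>
    simp only [pvStepB]
    by_cases hc : (PySem.Chars.isspace c || PySem.Chars.startswith (c :: t) ['#']) = true
    · rw [if_pos hc, if_pos hc]
      have h1 : ¬ (pre ++ l).isEmpty = true := by simp [h]
      have h2 : ¬ l.isEmpty = true := by simp [h]
      rw [if_neg h1, if_neg h2]
      exact pv_appendLast_append pre l _ h
    · rw [if_neg hc, if_neg hc]
      by_cases hk : PySem.Chars.isIn [':'] (c :: t) = true
      · rw [if_pos hk, if_pos hk, List.append_assoc]
      · rw [if_neg hk, if_neg hk]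

theorem pv_foldB_append (ls : List (List Char))
    (pre l : List (List Char × List Char × List (List Char))) (h : l ≠ []) :
    ls.foldl pvStepB (pre ++ l) = pre ++ ls.foldl pvStepB l := by
  induction ls generalizing l with
  | nil => rfl
  | cons x rest ih =>
    rw [List.foldl_cons, List.foldl_cons, pv_stepB_append pre l x h,
        ih (pvStepB l x) (pv_stepB_ne_nil l x h)]

-- main invariant: from a state where key k was just assigned value v (rstrip-fixed) with buffer buf,
-- A's remaining loop + final flush equals folding B's remaining segments onto d
theorem pv_main (ls : List (List Char)) (d : PySem.Dict (List Char) (List Char))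
    (k v : List Char) (buf : List (List Char)) (hv : PySem.Chars.rstrip v = v) :
    pvFinishA (ls.foldl pvStepA (d.insert k v, some k, buf))
      = (ls.foldl pvStepB [(k, v, buf)]).foldl (fun d s => d.insert s.1 (pvJoinSeg s)) d := by
  induction ls generalizing d k v buf with
  | nil =>
    show pvFinishA (d.insert k v, some k, buf) = d.insert k (pvJoinSeg (k, v, buf))
    cases buf with
    | nil =>
      show d.insert k v = d.insert k (pvJoinSeg (k, v, []))
      unfold pvJoinSeg
      rw [PySem.Chars.join_singleton]
      simp [hv]
    | cons b bs =>
      show pvFlushA (d.insert k v) k (b :: bs) = d.insert k (pvJoinSeg (k, v, b :: bs))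
      exact pv_flushA_insert d k v (b :: bs)
  | cons x rest ih =>
    rw [List.foldl_cons, List.foldl_cons]
    cases x with
    | nil => exact ih d k v buf hv
    | cons c t =>
      simp only [pvStepA, pvStepB]
      by_cases hc : (PySem.Chars.isspace c || PySem.Chars.startswith (c :: t) ['#']) = true
      · rw [if_pos hc, if_pos hc, if_neg (by simp : ¬ ([(k, v, buf)] : List _).isEmpty = true)]
        simp only [pvAppendLast]
        exact ih d k v (buf ++ [c :: t]) hv
      · rw [if_neg hc, if_neg hc]
        by_cases hk : PySem.Chars.isIn [':'] (c :: t) = true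
        · rw [if_pos hk, if_pos hk]
          simp only [pv_flushA_insert]
          rw [pv_foldB_append rest [(k, v, buf)] _ (by simp), List.singleton_append, List.foldl_cons]
          exact ih (d.insert k (pvJoinSeg (k, v, buf))) _ _ [] (pv_rstrip_strip _)
        · rw [if_neg hk, if_neg hk]
          exact ih d k v buf hv

theorem pv_main0 (ls : List (List Char)) :
    pvFinishA (ls.foldl pvStepA (PySem.Dict.empty, none, []))
      = (ls.foldl pvStepB []).foldl (fun d s => d.insert s.1 (pvJoinSeg s)) PySem.Dict.empty := by
  induction ls with
  | nil => rfl
  | cons x rest ih =>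
    rw [List.foldl_cons, List.foldl_cons]
    cases x with
    | nil => exact ih
    | cons c t =>
      simp only [pvStepA, pvStepB]
      by_cases hc : (PySem.Chars.isspace c || PySem.Chars.startswith (c :: t) ['#']) = true
      · rw [if_pos hc, if_pos hc, if_pos (by simp : ([] : List (List Char × List Char × List (List Char))).isEmpty = true)]
        exact ih
      · rw [if_neg hc, if_neg hc]
        by_cases hk : PySem.Chars.isIn [':'] (c :: t) = true
        · rw [if_pos hk, if_pos hk]
          simp only [List.nil_append]
          exact pv_main rest PySem.Dict.empty _ _ [] (pv_rstrip_strip _)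
        · rw [if_neg hk, if_neg hk]
          exact ih

-- ===== VERDICT (by name: the statement is the Claim_ definition above) =====
theorem parse_flat_keys_spec : Claim_equal_parse_flat_keys := by
  intro raw _
  show parse_flat_keys raw = parse_flat_keys_alt raw
  unfold parse_flat_keys parse_flat_keys_alt
  rw [pv_main0]
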